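-- pv_equiv track=rewrite | github.com/yudai-patronai/problembook | problems/dynamic/1d/platforms/solution.py | solve
-- ===== SOURCE A (Python) =====
-- def solve(n, heights):
--     cost = [-1] * n
--     cost[0] = 0
--     if 1 == n:
--         return 0
--     cost[1] = abs(heights[1] - heights[0])
--     for i in range(2, n):
--         fromFirst = abs(heights[i] - heights[i - 1]) + cost[i - 1]
--         fromSecond = 3 * abs(heights[i] - heights[i - 2]) + cost[i - 2]
--         cost[i] = fromFirst if fromFirst < fromSecond else fromSecond
--     return cost[n - 1]
-- ===== SOURCE B (Python) =====
-- def solve(n, heights):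
--     if 1 == n:
--         return 0
--     memo = {0: 0}
--
--     def f(i):
--         if i not in memo:
--             if i == 1:
--                 memo[i] = abs(heights[1] - heights[0])
--             else:
--                 memo[i] = min(abs(heights[i] - heights[i - 1]) + f(i - 1),
--                               3 * abs(heights[i] - heights[i - 2]) + f(i - 2))
--         return memo[i]
--
--     # warm the memo in bounded-depth chunks so large n stays within
--     # Python's default recursion limit
--     for k in range(500, n, 500):
--         f(k)
--     return f(n - 1)
-- ===== Notes on version B (the rewrite author's own statement) =====
-- stated objective: alternative
-- what changed: B replaces A's bottom-up array-filling loop by a top-down memoized recursive helper f(i) (dict cache, recursion on the two predecessors), with the cache warmed in bounded-depth chunks to respect Python's recursion limit.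
import Mathlib
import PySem

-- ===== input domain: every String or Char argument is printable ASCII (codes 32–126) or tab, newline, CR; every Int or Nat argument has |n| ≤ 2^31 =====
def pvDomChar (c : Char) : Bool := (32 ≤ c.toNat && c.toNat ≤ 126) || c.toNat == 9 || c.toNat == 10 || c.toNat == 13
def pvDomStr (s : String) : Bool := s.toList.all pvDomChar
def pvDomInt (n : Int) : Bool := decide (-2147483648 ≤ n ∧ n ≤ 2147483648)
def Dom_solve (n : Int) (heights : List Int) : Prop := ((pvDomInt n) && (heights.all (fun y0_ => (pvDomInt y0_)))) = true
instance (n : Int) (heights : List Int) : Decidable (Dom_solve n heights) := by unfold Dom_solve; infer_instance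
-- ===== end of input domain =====

-- B computes the same minimum cost by top-down memoized recursion f(i) on the two predecessors (dict cache, warmed in bounded-depth chunks), instead of A's bottom-up array-filling loop.


-- ===== PORT A =====
-- loop body of A's for-loop, kept as a named helper for the proofs
def stepA (heights : List Int) (cost : List Int) (i : Int) : List Int :=
  let fromFirst := |PySem.List.pyGetD heights i 0 - PySem.List.pyGetD heights (i - 1) 0| + PySem.List.pyGetD cost (i - 1) 0
  let fromSecond := 3 * |PySem.List.pyGetD heights i 0 - PySem.List.pyGetD heights (i - 2) 0| + PySem.List.pyGetD cost (i - 2) 0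
  PySem.List.pySetD cost i (if fromFirst < fromSecond then fromFirst else fromSecond)

def solve (n : Int) (heights : List Int) : Int :=
  let cost := List.replicate n.toNat (-1 : Int)
  let cost := PySem.List.pySetD cost 0 0
  if 1 = n then 0
  else
    let cost := PySem.List.pySetD cost 1 (|PySem.List.pyGetD heights 1 0 - PySem.List.pyGetD heights 0 0|)
    let cost := (PySem.List.pyRange 2 n 1).foldl (stepA heights) cost
    PySem.List.pyGetD cost (n - 1) 0

-- ===== PORT B =====
-- B's recursive helper f(i): memo lookup, else compute from f(i-1), f(i-2) and cache.
-- The Python helper mutates the closed-over dict; the port threads the memo through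
-- and returns (value, updated memo). i is a Nat here: Python B only ever calls f on
-- nonnegative indices (the i = 0 'none' arm is unreachable since key 0 is seeded).
def fB (heights : List Int) (i : Nat) (memo : PySem.Dict Int Int) : Int × PySem.Dict Int Int :=
  match memo.get? (i : Int) with
  | some v => (v, memo)
  | none =>
    match i with
    | 0 => (0, memo)   -- unreachable: the seed {0: 0} is always present
    | 1 =>
      let v := |PySem.List.pyGetD heights 1 0 - PySem.List.pyGetD heights 0 0|
      (v, memo.insert 1 v)
    | j + 2 =>
      let r1 := fB heights (j + 1) memo
      let r2 := fB heights j r1.2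
      let v := min (|PySem.List.pyGetD heights ((j : Int) + 2) 0 - PySem.List.pyGetD heights ((j : Int) + 1) 0| + r1.1)
                   (3 * |PySem.List.pyGetD heights ((j : Int) + 2) 0 - PySem.List.pyGetD heights (j : Int) 0| + r2.1)
      (v, r2.2.insert ((j : Int) + 2) v)

def solve_alt (n : Int) (heights : List Int) : Int :=
  if 1 = n then 0
  else
    let memo : PySem.Dict Int Int := PySem.Dict.empty.insert 0 0   -- {0: 0}
    -- warm the memo in bounded-depth chunks (range(500, n, 500))
    let memo := (PySem.List.pyRange 500 n 500).foldl (fun m k => (fB heights k.toNat m).2) memo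
    (fB heights (n - 1).toNat memo).1

-- ===== PRECONDITION & SPEC =====
-- Pre_ excludes exactly the inputs on which Python A raises IndexError:
-- n ≤ 0 (cost[0] on an empty cost list) and 2 ≤ n with fewer than n heights.
def Pre_solve (n : Int) (heights : List Int) : Prop :=
  n = 1 ∨ (2 ≤ n ∧ n ≤ (heights.length : Int))
instance (n : Int) (heights : List Int) : Decidable (Pre_solve n heights) := by unfold Pre_solve; infer_instance
def pvWitness_solve : Int × List Int := (3, [1, 5, 2])

def Spec_solve (n : Int) (heights : List Int) (out : Int) : Prop := out = solve_alt n heights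
instance (n : Int) (heights : List Int) (out : Int) : Decidable (Spec_solve n heights out) := by unfold Spec_solve; infer_instance

-- ===== CLAIM (what is proved, stated in full; the proofs are below) =====
def Claim_equal_solve : Prop := ∀ (n : Int) (heights : List Int), Dom_solve n heights → Pre_solve n heights → Spec_solve n heights (solve n heights)

-- ===== LEMMAS AND PROOFS =====

-- the mathematical recurrence both programs compute
def cRec (heights : List Int) : Nat → Int
  | 0 => 0
  | 1 => |PySem.List.pyGetD heights 1 0 - PySem.List.pyGetD heights 0 0|
  | j + 2 =>
      min (|PySem.List.pyGetD heights ((j : Int) + 2) 0 - PySem.List.pyGetD heights ((j : Int) + 1) 0| + cRec heights (j + 1))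
          (3 * |PySem.List.pyGetD heights ((j : Int) + 2) 0 - PySem.List.pyGetD heights (j : Int) 0| + cRec heights j)

-- cRec at an Int index i ≥ 2, phrased with Int arithmetic
lemma cRec_int (heights : List Int) (i : Int) (hi : 2 ≤ i) :
    cRec heights i.toNat =
      min (|PySem.List.pyGetD heights i 0 - PySem.List.pyGetD heights (i - 1) 0| + cRec heights (i - 1).toNat)
          (3 * |PySem.List.pyGetD heights i 0 - PySem.List.pyGetD heights (i - 2) 0| + cRec heights (i - 2).toNat) := by
  obtain ⟨j, hj⟩ : ∃ j : Nat, i.toNat = j + 2 := ⟨(i - 2).toNat, by omega⟩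
  have e2 : ((j : Int) + 2) = i := by omega
  have e1 : ((j : Int) + 1) = i - 1 := by omega
  have e0 : (j : Int) = i - 2 := by omega
  have h1 : (i - 1).toNat = j + 1 := by omega
  have h0 : (i - 2).toNat = j := by omega
  rw [hj, h1, h0, cRec, e2, e1, e0]

-- every cached value is a value of the recurrence
def Coherent (heights : List Int) (m : PySem.Dict Int Int) : Prop :=
  ∀ (j : Nat) (v : Int), m.get? (j : Int) = some v → v = cRec heights j

lemma coherent_insert (heights : List Int) (m : PySem.Dict Int Int) (i : Nat)
    (hm : Coherent heights m) :
    Coherent heights (m.insert (i : Int) (cRec heights i)) := by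
  intro j v hv
  rw [PySem.Dict.get?_insert] at hv
  split at hv
  · rename_i h
    have : j = i := by exact_mod_cast h
    subst this
    exact (Option.some_inj.mp hv).symm
  · exact hm j v hv

-- f returns the recurrence value and keeps the memo coherent
lemma fB_correct (heights : List Int) (i : Nat) (memo : PySem.Dict Int Int)
    (hm : Coherent heights memo) :
    (fB heights i memo).1 = cRec heights i ∧ Coherent heights (fB heights i memo).2 := by
  induction i using Nat.strong_induction_on generalizing memo with
  | _ i ih =>
    cases hget : memo.get? (i : Int) with
    | some v =>
      have hv := hm i v hget
      rw [fB.eq_def, hget]; dsimp only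
      exact ⟨hv, hm⟩
    | none =>
      match i with
      | 0 => rw [fB.eq_def, hget]; exact ⟨rfl, hm⟩
      | 1 =>
        rw [fB.eq_def, hget]; dsimp only
        refine ⟨rfl, ?_⟩
        have := coherent_insert heights memo 1 hm
        simpa [cRec] using this
      | j + 2 =>
        have ih1 := ih (j + 1) (by omega) memo hm
        have ih2 := ih j (by omega) (fB heights (j + 1) memo).2 ih1.2
        rw [fB.eq_def, hget]; dsimp only
        refine ⟨?_, ?_⟩
        · rw [ih1.1, ih2.1]; rfl
        · have hval : min (|PySem.List.pyGetD heights ((j : Int) + 2) 0 - PySem.List.pyGetD heights ((j : Int) + 1) 0| + (fB heights (j+1) memo).1)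
                   (3 * |PySem.List.pyGetD heights ((j : Int) + 2) 0 - PySem.List.pyGetD heights (j : Int) 0| + (fB heights j (fB heights (j+1) memo).2).1)
                 = cRec heights (j + 2) := by
            rw [ih1.1, ih2.1]; rfl
          have := coherent_insert heights (fB heights j (fB heights (j+1) memo).2).2 (j + 2) ih2.2
          rw [← hval] at this
          simpa using this

-- the warm-up loop keeps the memo coherent
lemma coherent_foldl (heights : List Int) (ks : List Int) (memo : PySem.Dict Int Int)
    (hm : Coherent heights memo) :
    Coherent heights (ks.foldl (fun m k => (fB heights k.toNat m).2) memo) := by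
  induction ks generalizing memo with
  | nil => exact hm
  | cons k ks ih => exact ih _ ((fB_correct heights k.toNat memo hm).2)

-- the seed {0: 0} is coherent
lemma coherent_seed (heights : List Int) :
    Coherent heights (PySem.Dict.empty.insert 0 0) := by
  intro j v hv
  rw [PySem.Dict.get?_insert] at hv
  split at hv
  · rename_i h
    have : j = 0 := by exact_mod_cast h
    subst this
    simpa [cRec] using (Option.some_inj.mp hv).symm
  · simp [PySem.Dict.get?_empty] at hv

-- indexing into a just-assigned list, Int-index form
lemma getD_setD_int (xs : List Int) (i j v d : Int) (hi : 0 ≤ i) (_hilen : i < (xs.length : Int))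
    (hj : 0 ≤ j) (hjlen : j < (xs.length : Int)) :
    PySem.List.pyGetD (PySem.List.pySetD xs i v) j d = if j = i then v else PySem.List.pyGetD xs j d := by
  rw [PySem.List.pySetD_of_nonneg xs v hi,
    PySem.List.pyGetD_eq_getElem _ d hj (by rw [List.length_set]; exact_mod_cast hjlen),
    List.getElem_set]
  by_cases h : j = i
  · rw [if_pos (by omega : i.toNat = j.toNat), if_pos h]
  · rw [if_neg (by omega : ¬ i.toNat = j.toNat), if_neg h,
      PySem.List.pyGetD_eq_getElem _ d hj hjlen]

lemma ite_lt_eq_min (a b : Int) : (if a < b then a else b) = min a b := by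
  rcases lt_trichotomy a b with h | h | h <;> simp [min_def, h] <;> omega

-- loop invariant for A: after folding over range(k, k+m), the last two cost cells hold the recurrence values
lemma loop_inv (heights cost : List Int) (m : Nat) (k : Int)
    (hk : 2 ≤ k) (hlen : k + (m : Int) ≤ (cost.length : Int))
    (h1 : PySem.List.pyGetD cost (k - 1) 0 = cRec heights (k - 1).toNat)
    (h2 : PySem.List.pyGetD cost (k - 2) 0 = cRec heights (k - 2).toNat) :
    (((PySem.List.pyRange k (k + (m : Int)) 1).foldl (stepA heights) cost).length = cost.length)
    ∧ PySem.List.pyGetD ((PySem.List.pyRange k (k + (m : Int)) 1).foldl (stepA heights) cost) (k + (m : Int) - 1) 0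
        = cRec heights (k + (m : Int) - 1).toNat
    ∧ PySem.List.pyGetD ((PySem.List.pyRange k (k + (m : Int)) 1).foldl (stepA heights) cost) (k + (m : Int) - 2) 0
        = cRec heights (k + (m : Int) - 2).toNat := by
  induction m with
  | zero =>
    rw [show k + ((0 : Nat) : Int) = k by omega, PySem.List.pyRange_one_eq_nil le_rfl]
    exact ⟨rfl, h1, h2⟩
  | succ m ih =>
    have hsplit : PySem.List.pyRange k (k + ((m + 1 : Nat) : Int)) 1
        = PySem.List.pyRange k (k + (m : Int)) 1 ++ [k + (m : Int)] := by
      rw [show k + ((m + 1 : Nat) : Int) = (k + (m : Int)) + 1 by push_cast; ring]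
      exact PySem.List.pyRange_one_succ_right (by omega)
    obtain ⟨ihlen, ih1, ih2⟩ := ih (by push_cast at hlen ⊢; omega)
    set L := PySem.List.pyRange k (k + (m : Int)) 1 with hL
    set cF := L.foldl (stepA heights) cost with hcF
    rw [hsplit, List.foldl_append]
    simp only [List.foldl_cons, List.foldl_nil]
    have hcFlen : k + (m : Int) < (cF.length : Int) := by
      rw [ihlen]; push_cast at hlen ⊢; omega
    have e1 : k + ((m + 1 : Nat) : Int) - 1 = k + (m : Int) := by push_cast; ring
    have e2 : k + ((m + 1 : Nat) : Int) - 2 = k + (m : Int) - 1 := by push_cast; ring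
    refine ⟨?_, ?_, ?_⟩
    · simp only [stepA, PySem.List.length_pySetD]; exact ihlen
    · rw [e1]
      simp only [stepA]
      rw [getD_setD_int cF (k + (m : Int)) (k + (m : Int)) _ 0 (by omega) hcFlen (by omega) hcFlen,
        if_pos rfl, ih1, ih2, ite_lt_eq_min,
        cRec_int heights (k + (m : Int)) (by omega)]
    · rw [e2]
      simp only [stepA]
      rw [getD_setD_int cF (k + (m : Int)) (k + (m : Int) - 1) _ 0 (by omega) hcFlen (by omega) (by omega),
        if_neg (by omega : ¬ (k + (m : Int) - 1 = k + (m : Int)))]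
      exact ih1

-- ===== VERDICT (by name: the statement is the Claim_ definition above) =====
theorem solve_spec : Claim_equal_solve := by
  intro n heights _ hpre
  unfold Spec_solve solve solve_alt
  dsimp only
  rcases hpre with h1 | ⟨hn, _⟩
  · rw [if_pos h1.symm, if_pos h1.symm]
  · rw [if_neg (by omega : ¬ (1 : Int) = n), if_neg (by omega : ¬ (1 : Int) = n)]
    -- B side: the warmed memo is coherent, so f(n-1) returns cRec (n-1)
    have hB := (fB_correct heights (n - 1).toNat
      ((PySem.List.pyRange 500 n 500).foldl (fun m k => (fB heights k.toNat m).2)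
        (PySem.Dict.empty.insert 0 0))
      (coherent_foldl heights _ _ (coherent_seed heights))).1
    rw [hB]
    -- A side: the filled array holds cRec at every reached index
    set c1 := |PySem.List.pyGetD heights 1 0 - PySem.List.pyGetD heights 0 0| with hc1
    set cost0 := PySem.List.pySetD (PySem.List.pySetD (List.replicate n.toNat (-1 : Int)) 0 0) 1 c1 with hcost0
    have hlenr : ((List.replicate n.toNat (-1 : Int)).length : Int) = n := by
      rw [List.length_replicate]; omega
    have hlen1 : ((PySem.List.pySetD (List.replicate n.toNat (-1 : Int)) 0 0).length : Int) = n := by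
      rw [PySem.List.length_pySetD]; exact hlenr
    have hlen0 : ((cost0.length : Int)) = n := by
      rw [hcost0, PySem.List.length_pySetD]; exact hlen1
    have hg1 : PySem.List.pyGetD cost0 (2 - 1) 0 = cRec heights ((2 : Int) - 1).toNat := by
      rw [hcost0, getD_setD_int _ 1 (2 - 1) c1 0 (by omega) (by rw [hlen1]; omega) (by omega)
        (by rw [hlen1]; omega), if_pos (by norm_num)]
      norm_num [cRec, hc1]
    have hg0 : PySem.List.pyGetD cost0 (2 - 2) 0 = cRec heights ((2 : Int) - 2).toNat := by
      rw [hcost0, getD_setD_int _ 1 (2 - 2) c1 0 (by omega) (by rw [hlen1]; omega) (by omega)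
        (by rw [hlen1]; omega), if_neg (by norm_num),
        getD_setD_int _ 0 (2 - 2) 0 0 (by omega) (by rw [hlenr]; omega) (by omega)
        (by rw [hlenr]; omega), if_pos (by norm_num)]
      norm_num [cRec]
    obtain ⟨_, hfin, _⟩ := loop_inv heights cost0 (n - 2).toNat 2 le_rfl
      (by rw [hlen0]; omega) hg1 hg0
    rw [show (2 : Int) + (((n - 2).toNat : Nat) : Int) = n by omega] at hfin
    exact hfin
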